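-- pv_equiv track=rewrite | github.com/aurazboev/CS550_Advanced_Operating_Systems | Project_mod/Validator1.py | lookup_prefix
-- ===== SOURCE A (Python) =====
-- def lookup_prefix(block_hash, difficulty, hashes):
--     prefix = block_hash[:difficulty]
--     start_index = 0
--     end_index = len(hashes) - 1
--
--     while start_index <= end_index:
--         mid_index = (start_index + end_index) // 2
--         mid_value = hashes[mid_index][:difficulty]
--
--         if mid_value == prefix:
--             return mid_index
--
--         if mid_value < prefix:
--             start_index = mid_index + 1
--         else:
--             end_index = mid_index - 1
--
--     return -1
-- ===== SOURCE B (Python) =====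
-- def lookup_prefix(block_hash, difficulty, hashes):
--     prefix = block_hash[:difficulty]
--
--     def go(base, seg):
--         if not seg:
--             return -1
--         m = (len(seg) - 1) // 2
--         p = seg[m][:difficulty]
--         if p == prefix:
--             return base + m
--         if p < prefix:
--             return go(base + m + 1, seg[m + 1:])
--         return go(base, seg[:m])
--
--     return go(0, hashes)
-- ===== Notes on version B (the rewrite author's own statement) =====
-- stated objective: alternative
-- what changed: Replaced the index-pair while loop with a recursive divide-and-conquer on list segments: a helper carries a base offset and a sublist, picks the same midpoint, and recurses on the left or right slice; the returned index is identical on every input.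
import Mathlib
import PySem

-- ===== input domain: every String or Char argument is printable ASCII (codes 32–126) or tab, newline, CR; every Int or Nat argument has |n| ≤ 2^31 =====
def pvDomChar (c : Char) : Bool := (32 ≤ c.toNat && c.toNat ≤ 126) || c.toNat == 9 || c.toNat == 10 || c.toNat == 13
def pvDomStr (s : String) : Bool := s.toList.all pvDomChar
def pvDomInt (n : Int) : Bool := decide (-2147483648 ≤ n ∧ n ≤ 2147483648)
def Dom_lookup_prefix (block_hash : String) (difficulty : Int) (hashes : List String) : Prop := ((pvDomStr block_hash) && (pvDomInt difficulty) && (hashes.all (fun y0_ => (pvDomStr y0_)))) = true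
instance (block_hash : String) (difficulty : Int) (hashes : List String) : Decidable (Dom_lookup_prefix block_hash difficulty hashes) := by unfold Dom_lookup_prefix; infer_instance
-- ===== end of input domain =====

-- B replaces A's index-pair while loop by a recursive divide-and-conquer on list segments
-- (base offset + sublist) with the same midpoint choice; objective: alternative decomposition.


-- Python's '<' on str: lexicographic by code point (shared primitive, used by both ports).
def pyStrLt : List Char → List Char → Bool
  | [], [] => false
  | [], _ :: _ => true
  | _ :: _, [] => false
  | c :: a, d :: b => if c < d then true else if d < c then false else pyStrLt a b

-- ===== PORT A =====
-- while start_index <= end_index: … (binary search over an index pair)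
def pvLoopA (difficulty : Int) (pfx : List Char) (hashes : List String) (lo hi : Int) : Int :=
  if h : lo ≤ hi then
    let mid := PySem.Int.floordiv (lo + hi) 2
    -- hashes[mid]: mid is always in range on A's executions, default never used
    let midv := PySem.List.slice (PySem.List.pyGetD hashes mid "").toList none (some difficulty)
    if midv == pfx then mid
    else if pyStrLt midv pfx then pvLoopA difficulty pfx hashes (mid + 1) hi
    else pvLoopA difficulty pfx hashes lo (mid - 1)
  else -1
termination_by (hi - lo + 1).toNat
decreasing_by
  · have := PySem.Int.floordiv_two_mid_bounds h; omega
  · have := PySem.Int.floordiv_two_mid_bounds h; omega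

def lookup_prefix (block_hash : String) (difficulty : Int) (hashes : List String) : Int :=
  let pfx := PySem.List.slice block_hash.toList none (some difficulty)
  pvLoopA difficulty pfx hashes 0 ((hashes.length : Int) - 1)

-- ===== PORT B =====
-- go(base, seg): recursive search on a list segment carrying its base offset.
-- m = (len(seg)-1)//2 is Nat division since len(seg) ≥ 1 in this branch;
-- seg[m+1:] / seg[:m] are List.drop / List.take (nonnegative bounds, exact).
def pvGoB (difficulty : Int) (pfx : List Char) (base : Int) (seg : List String) : Int :=
  if h : seg.isEmpty then -1
  else
    let m : Nat := (seg.length - 1) / 2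
    let p := PySem.List.slice (PySem.List.pyGetD seg (m : Int) "").toList none (some difficulty)
    if p == pfx then base + (m : Int)
    else if pyStrLt p pfx then pvGoB difficulty pfx (base + (m : Int) + 1) (seg.drop (m + 1))
    else pvGoB difficulty pfx base (seg.take m)
termination_by seg.length
decreasing_by
  · have hne : seg ≠ [] := by simpa [List.isEmpty_iff] using h
    have : 0 < seg.length := List.length_pos_iff.mpr hne
    simp [List.length_drop]; omega
  · have hne : seg ≠ [] := by simpa [List.isEmpty_iff] using h
    have : 0 < seg.length := List.length_pos_iff.mpr hne
    simp [List.length_take]; omega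

def lookup_prefix_alt (block_hash : String) (difficulty : Int) (hashes : List String) : Int :=
  let pfx := PySem.List.slice block_hash.toList none (some difficulty)
  pvGoB difficulty pfx 0 hashes

-- ===== PRECONDITION & SPEC =====
def Spec_lookup_prefix (block_hash : String) (difficulty : Int) (hashes : List String) (out : Int) : Prop := out = lookup_prefix_alt block_hash difficulty hashes
instance (block_hash : String) (difficulty : Int) (hashes : List String) (out : Int) : Decidable (Spec_lookup_prefix block_hash difficulty hashes out) := by unfold Spec_lookup_prefix; infer_instance

-- ===== CLAIM (what is proved, stated in full; the proofs are below) =====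
def Claim_equal_lookup_prefix : Prop := ∀ (block_hash : String) (difficulty : Int) (hashes : List String), Dom_lookup_prefix block_hash difficulty hashes → Spec_lookup_prefix block_hash difficulty hashes (lookup_prefix block_hash difficulty hashes)

-- ===== LEMMAS AND PROOFS =====

-- A's loop on (lo, hi) equals B's recursion on the segment hashes[lo..hi] with base lo.
lemma pvLoopA_eq_pvGoB (difficulty : Int) (pfx : List Char) (hashes : List String) :
    ∀ (L : Nat) (lo hi : Int), 0 ≤ lo → lo - 1 ≤ hi → hi < (hashes.length : Int) →
      (hi + 1 - lo).toNat = L →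
      pvLoopA difficulty pfx hashes lo hi
        = pvGoB difficulty pfx lo ((hashes.drop lo.toNat).take L) := by
  intro L
  induction L using Nat.strong_induction_on with
  | _ L ih =>
    intro lo hi hlo hlohi hhi hL
    by_cases hle : lo ≤ hi
    · -- nonempty segment
      have hlen : 0 < L := by omega
      have hmb := PySem.Int.floordiv_two_mid_bounds hle
      set mid := PySem.Int.floordiv (lo + hi) 2 with hmiddef
      set seg := (hashes.drop lo.toNat).take L with hseg
      have hlolt : lo.toNat < hashes.length := by omega
      have hseglen : seg.length = L := by
        simp [hseg, List.length_take, List.length_drop]; omega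
      have hsegne : ¬ seg.isEmpty := by
        simp [List.isEmpty_iff, ← List.length_eq_zero_iff, hseglen]; omega
      set m : Nat := (L - 1) / 2 with hmdef
      have hmlt : m < L := by omega
      -- mid = lo + m
      have hmid : mid = lo + (m : Int) := by
        rw [hmiddef, PySem.Int.floordiv_eq_iff_of_pos (by omega : (0:Int) < 2)]
        have h2 : 2 * m ≤ L - 1 ∧ L - 1 < 2 * m + 2 := by omega
        omega
      -- the inspected element agrees
      have helem : PySem.List.pyGetD hashes mid "" = PySem.List.pyGetD seg (m : Int) "" := by
        rw [hmid]
        have h1 : lo + (m : Int) = ((lo.toNat + m : Nat) : Int) := by omega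
        rw [h1, PySem.List.pyGetD_natCast, PySem.List.pyGetD_natCast]
        simp [hseg, List.getD, hmlt, List.getElem?_drop]
      rw [pvLoopA, dif_pos hle, pvGoB, dif_neg hsegne]
      simp only [← hmiddef, hseglen, ← hmdef, helem]
      split
      · rw [hmid]
      · split
        · -- go right: lo' = mid+1, hi' = hi, L' = L - (m+1)
          have h1 : (hi + 1 - (mid + 1)).toNat = L - (m + 1) := by omega
          rw [ih (L - (m + 1)) (by omega) (mid + 1) hi (by omega) (by omega) hhi h1]
          congr 1
          · omega
          · have h2 : (mid + 1).toNat = lo.toNat + (m + 1) := by omega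
            rw [h2, hseg, List.drop_take, ← List.drop_drop]
        · -- go left: lo' = lo, hi' = mid - 1, L' = m
          have h1 : (mid - 1 + 1 - lo).toNat = m := by omega
          rw [ih m (by omega) lo (mid - 1) hlo (by omega) (by omega) h1]
          congr 1
          rw [hseg, List.take_take]
          congr 1
          omega
    · -- empty segment: both return -1
      have hL0 : L = 0 := by omega
      rw [pvLoopA, dif_neg hle, hL0]
      simp [pvGoB]

-- ===== VERDICT (by name: the statement is the Claim_ definition above) =====
theorem lookup_prefix_spec : Claim_equal_lookup_prefix := by
  intro block_hash difficulty hashes _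
  unfold Spec_lookup_prefix lookup_prefix lookup_prefix_alt
  have h := pvLoopA_eq_pvGoB difficulty (PySem.List.slice block_hash.toList none (some difficulty))
      hashes hashes.length 0 ((hashes.length : Int) - 1) le_rfl (by omega) (by omega) (by omega)
  simpa using h
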